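-- pv_equiv track=rewrite | github.com/kkorolyov/Algorithms | SwapSortable.py | swapSortable
-- ===== SOURCE A (Python) =====
-- def swapSortable(array):
-- 	justSwapped = False
--
-- 	for i in range(1, len(array)):
-- 		if array[i] <= array[i - 1]:
-- 			if justSwapped:
-- 				return False
-- 			else:
-- 				justSwapped = True
-- 		else:
-- 			justSwapped = False
--
-- 	return True
-- ===== SOURCE B (Python) =====
-- def swapSortable(array):
--     return not any(c <= b <= a for a, b, c in zip(array, array[1:], array[2:]))
-- ===== Notes on version B (the rewrite author's own statement) =====
-- stated objective: idiomatic
-- what changed: Replaced the stateful scan threading a justSwapped flag with a stateless any() over sliding 3-element windows (zip of the list with its two shifts) testing the chained comparison c <= b <= a.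
import Mathlib
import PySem

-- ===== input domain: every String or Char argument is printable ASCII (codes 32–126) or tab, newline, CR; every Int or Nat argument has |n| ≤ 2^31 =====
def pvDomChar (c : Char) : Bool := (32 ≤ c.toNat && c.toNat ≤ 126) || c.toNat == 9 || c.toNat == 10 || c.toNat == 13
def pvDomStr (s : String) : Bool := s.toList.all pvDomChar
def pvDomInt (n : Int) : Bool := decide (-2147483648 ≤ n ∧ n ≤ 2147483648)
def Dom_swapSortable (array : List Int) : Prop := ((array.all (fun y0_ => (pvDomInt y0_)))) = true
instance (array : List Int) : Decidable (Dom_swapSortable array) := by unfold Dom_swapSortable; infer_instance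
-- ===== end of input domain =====

-- B replaces A's justSwapped flag state machine with a stateless scan of 3-element windows (idiomatic any()/zip in Python).

-- ===== PORT A =====
-- A's loop 'for i in range(1, len(array))' compares array[i] with array[i-1], threading
-- the justSwapped flag; ported as structural recursion carrying the previous element and the flag.
def swapSortableLoop (prev : Int) (rest : List Int) (justSwapped : Bool) : Bool :=
  match rest with
  | [] => true
  | x :: xs =>
    if x ≤ prev then
      if justSwapped then false else swapSortableLoop x xs true
    else swapSortableLoop x xs false

def swapSortable (array : List Int) : Bool :=
  match array with
  | [] => true
  | a :: rest => swapSortableLoop a rest false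

-- ===== PORT B =====
-- Source B: not any(c <= b <= a for a,b,c in zip(array, array[1:], array[2:]))
-- ported as recursion over the sliding 3-element windows.
def swapSortable_alt (array : List Int) : Bool :=
  match array with
  | a :: b :: c :: rest => if c ≤ b ∧ b ≤ a then false else swapSortable_alt (b :: c :: rest)
  | _ => true

-- ===== PRECONDITION & SPEC =====
def Spec_swapSortable (array : List Int) (out : Bool) : Prop := out = swapSortable_alt array
instance (array : List Int) (out : Bool) : Decidable (Spec_swapSortable array out) := by unfold Spec_swapSortable; infer_instance

-- ===== CLAIM (what is proved, stated in full; the proofs are below) =====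
def Claim_equal_swapSortable : Prop := ∀ (array : List Int), Dom_swapSortable array → Spec_swapSortable array (swapSortable array)

-- ===== LEMMAS AND PROOFS =====
lemma alt_cons3 (a b c : Int) (rest : List Int) :
    swapSortable_alt (a :: b :: c :: rest) = if c ≤ b ∧ b ≤ a then false else swapSortable_alt (b :: c :: rest) := by
  rw [swapSortable_alt]

lemma swapSortableLoop_eq_alt : ∀ (xs : List Int) (p : Int),
    (swapSortableLoop p xs true =
      (match xs with | [] => true | x :: ys => if x ≤ p then false else swapSortable_alt (x :: ys)))
    ∧ swapSortableLoop p xs false = swapSortable_alt (p :: xs) := by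
  intro xs
  induction xs with
  | nil => intro p; simp [swapSortableLoop, swapSortable_alt]
  | cons x ys ih =>
    intro p
    constructor
    · show swapSortableLoop p (x :: ys) true = _
      simp only [swapSortableLoop]
      by_cases hxp : x ≤ p
      · simp [hxp]
      · simp [hxp, (ih x).2]
    · show swapSortableLoop p (x :: ys) false = swapSortable_alt (p :: x :: ys)
      simp only [swapSortableLoop]
      cases ys with
      | nil =>
        simp [swapSortableLoop, swapSortable_alt]
      | cons y zs =>
        by_cases hxp : x ≤ p
        · -- uses (ih x).1
          have h1 := (ih x).1
          simp only [hxp, if_true]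
          rw [h1, alt_cons3]
          by_cases hyx : y ≤ x
          · simp [hyx, hxp]
          · simp only [hyx, if_false]
            cases zs with
            | nil => simp [swapSortable_alt]
            | cons z ws => rw [alt_cons3]; simp [hyx]
        · have h2 := (ih x).2
          simp only [hxp, if_false]
          rw [h2, alt_cons3]
          simp [hxp]

-- ===== VERDICT (by name: the statement is the Claim_ definition above) =====
theorem swapSortable_spec : Claim_equal_swapSortable := by
  intro array _
  unfold Spec_swapSortable
  cases array with
  | nil => rfl
  | cons a rest => exact (swapSortableLoop_eq_alt rest a).2
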